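-- pv_equiv track=rewrite | github.com/taehee-kim-dev/Problem-solving | Programmers/Kakao/Level3/2019_KAKAO_WINTER_INTERNSHIP/Crossing_the_stepping_stone.py | can_cross_stones
-- ===== SOURCE A (Python) =====
-- def can_cross_stones(stones, number_of_people, k):
--     # 사람들이 건너고 있는 중간에 0의 디딤돌이 연속으로 k개 이상이 되면,
--     # 그 이후의 사람들이 건널 수 없어, 모든 사람들이 징검다리를 건널 수 없다.
--     # 하지만, 모든 사람들이 건너고 나서 0의 디딤돌이 연속으로 k개 이상이 되는것은,
--     # 이미 모든 사람들이 건넌 이후이므로 상관없다.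
--
--     # 사람들이 건너고 있는 동안에 체크한 연속된 0의 디딤돌의 수
--     zeros_continuous_count_while_crossing = 0
--     # 디딤돌을 하나씩 검사한다.
--     for stone in stones:
--         # 디딤돌의 숫자가 건너려는 사람의 수보다 작으면
--         # 사람들이 이 디딤돌을 건너고 있는 중간에
--         # 이 돌의 숫자는 0이된다.
--         if stone < number_of_people:
--             # 사람들이 건너고 있는 동안에 체크한 연속된 0의 디딤돌의 수 1 증가
--             zeros_continuous_count_while_crossing += 1
--             # 만약 현재까지 체크한 연속된 0의 디딤돌의 갯수가 k이상이면
--             # number_of_people의 사람들은 이 징검다리를 건널 수 없다.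
--             if zeros_continuous_count_while_crossing >= k:
--                 return False
--         else:
--             # 디딤돌의 숫자가 건너려는 사람의 수보다 크거나 같으면,
--             # 해당 수의 사람들이 모두 건너는 중간에 이 디딤돌은 0이 되지 않는다.
--             # 디딤돌의 숫자가 건너려는 사람의 수와 같다면
--             # 마지막 순서의 사람이 이 돌을 밟으면서 건넜을 때 0이 되므로,
--             # 결국 모든 사람들이 건너고 나서 0이 되는 것이다.
--             # 따라서 사람들이 건너고 있는 중간에는 0이 아니므로,
--             # 위에서 세고있던 zeros_continuous_count_while_crossing를
--             # 0으로 초기화해야 한다.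
--             zeros_continuous_count_while_crossing = 0
--
--     # for문을 무사히 빠져나오면,
--     # number_of_people 수의 사람들이 이 징검다리를 건널 수 있다.
--     return True
-- ===== SOURCE B (Python) =====
-- def can_cross_stones(stones, number_of_people, k):
--     # Partition the stones into maximal consecutive runs by the predicate
--     # "stone < number_of_people"; crossing is possible iff every 'low' run
--     # is shorter than k.
--     groups = []
--     i, n = 0, len(stones)
--     while i < n:
--         key = stones[i] < number_of_people
--         j = i
--         while j < n and (stones[j] < number_of_people) == key:
--             j += 1
--         groups.append((key, j - i))
--         i = j
--     return all(not key or length < k for key, length in groups)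
-- ===== Notes on version B (the rewrite author's own statement) =====
-- stated objective: alternative
-- what changed: Replaced the running-counter-with-early-return scan by a group-then-check decomposition: the stones are partitioned into maximal consecutive runs of the predicate stone < number_of_people, and the answer is all(run_length < k) over the low-keyed runs.
import Mathlib
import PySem

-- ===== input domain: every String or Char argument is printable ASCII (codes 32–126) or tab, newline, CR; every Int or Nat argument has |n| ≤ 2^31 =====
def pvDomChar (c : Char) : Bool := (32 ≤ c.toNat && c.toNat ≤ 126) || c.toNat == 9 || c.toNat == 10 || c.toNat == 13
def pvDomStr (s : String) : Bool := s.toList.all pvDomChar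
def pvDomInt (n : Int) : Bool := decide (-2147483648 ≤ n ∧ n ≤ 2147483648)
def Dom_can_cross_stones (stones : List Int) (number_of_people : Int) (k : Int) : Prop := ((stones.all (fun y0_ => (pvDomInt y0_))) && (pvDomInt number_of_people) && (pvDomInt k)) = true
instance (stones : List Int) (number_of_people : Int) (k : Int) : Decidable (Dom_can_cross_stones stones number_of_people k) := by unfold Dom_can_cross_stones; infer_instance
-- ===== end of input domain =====

-- B partitions the stones into maximal consecutive runs of the predicate
-- `stone < number_of_people` and checks every low-keyed run is shorter than k
-- (alternative decomposition; same O(n) cost as A's running-counter scan).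

-- ===== PORT A =====
def canGoA (stones : List Int) (number_of_people k c : Int) : Bool :=
  match stones with
  | [] => true
  | s :: rest =>
    if s < number_of_people then
      if c + 1 ≥ k then false else canGoA rest number_of_people k (c + 1)
    else canGoA rest number_of_people k 0

def can_cross_stones (stones : List Int) (number_of_people : Int) (k : Int) : Bool :=
  canGoA stones number_of_people k 0

-- ===== PORT B =====
-- maximal consecutive runs: (key, run length), as Source B's outer while loop builds them
def pvRuns (p : Int → Bool) : List Int → List (Bool × Nat)
  | [] => []
  | x :: xs =>
    (p x, 1 + (xs.takeWhile (fun y => p y == p x)).length)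
      :: pvRuns p (xs.dropWhile (fun y => p y == p x))
termination_by l => l.length
decreasing_by
  simp only [List.length_cons]
  exact Nat.lt_succ_of_le (List.length_dropWhile_le _ _)

def can_cross_stones_alt (stones : List Int) (number_of_people : Int) (k : Int) : Bool :=
  (pvRuns (fun s => decide (s < number_of_people)) stones).all
    (fun g => !g.1 || decide ((g.2 : Int) < k))

-- ===== PRECONDITION & SPEC =====
def Spec_can_cross_stones (stones : List Int) (number_of_people : Int) (k : Int) (out : Bool) : Prop := out = can_cross_stones_alt stones number_of_people k
instance (stones : List Int) (number_of_people : Int) (k : Int) (out : Bool) : Decidable (Spec_can_cross_stones stones number_of_people k out) := by unfold Spec_can_cross_stones; infer_instance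

-- ===== CLAIM (what is proved, stated in full; the proofs are below) =====
def Claim_equal_can_cross_stones : Prop := ∀ (stones : List Int) (number_of_people : Int) (k : Int), Dom_can_cross_stones stones number_of_people k → Spec_can_cross_stones stones number_of_people k (can_cross_stones stones number_of_people k)

-- ===== LEMMAS AND PROOFS =====

-- ===== VERDICT (by name: the statement is the Claim_ definition above) =====
-- A with a low head: the whole leading low run is consumed, false iff the run total reaches k
lemma goA_low (n k : Int) : ∀ (xs : List Int) (x c : Int), x < n →
    canGoA (x :: xs) n k c =
      if c + 1 + ((xs.takeWhile (fun y => decide (y < n))).length : Int) ≥ k then false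
      else canGoA (xs.dropWhile (fun y => decide (y < n))) n k 0 := by
  intro xs
  induction xs with
  | nil =>
    intro x c hx
    simp [canGoA, hx]
  | cons y ys ih =>
    intro x c hx
    by_cases hy : y < n
    · have hih := ih y (c + 1) hy
      simp only [canGoA, hx, if_true, List.takeWhile_cons, List.dropWhile_cons, hy,
        decide_true] at *
      rw [hih]
      simp only [List.length_cons]
      push_cast
      split_ifs <;> first | rfl | omega
    · -- both sides start at the non-low stone y, which resets the counter
      simp [canGoA, hx, hy]

-- A skips a prefix of non-low stones with counter 0
lemma goA_skip (n k : Int) : ∀ (pre rest : List Int), (∀ x ∈ pre, ¬ x < n) →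
    canGoA (pre ++ rest) n k 0 = canGoA rest n k 0 := by
  intro pre
  induction pre with
  | nil => intro rest _; rfl
  | cons x xs ih =>
    intro rest h
    have hx := h x (List.mem_cons_self ..)
    simp only [List.cons_append, canGoA, hx, if_false]
    exact ih rest (fun y hy => h y (List.mem_cons_of_mem _ hy))

lemma goA_eq_runs (n k : Int) : ∀ (m : Nat) (xs : List Int), xs.length ≤ m →
    canGoA xs n k 0 =
      (pvRuns (fun s => decide (s < n)) xs).all (fun g => !g.1 || decide ((g.2 : Int) < k)) := by
  intro m
  induction m with
  | zero =>
    intro xs h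
    have : xs = [] := List.eq_nil_of_length_eq_zero (Nat.le_zero.mp h)
    subst this
    simp [canGoA, pvRuns]
  | succ m ih =>
    intro xs h
    match xs with
    | [] => simp [canGoA, pvRuns]
    | x :: xs' =>
      simp only [List.length_cons, Nat.succ_le_succ_iff] at h
      by_cases hx : x < n
      · have hfe : (fun y => decide (y < n) == decide (x < n)) = (fun y => decide (y < n)) := by
          funext y
          simp only [hx, decide_true]
          cases decide (y < n) <;> rfl
        rw [goA_low n k xs' x 0 hx, pvRuns, hfe]
        simp only [hx, decide_true, List.all_cons, Bool.not_true, Bool.false_or]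
        have hdl : (xs'.dropWhile (fun y => decide (y < n))).length ≤ m :=
          le_trans (List.length_dropWhile_le _ _) h
        rw [ih _ hdl]
        by_cases hk : (0:Int) + 1 + ((xs'.takeWhile (fun y => decide (y < n))).length : Int) ≥ k
        · rw [if_pos hk]
          have h2 : decide (((1 + (xs'.takeWhile (fun y => decide (y < n))).length : Nat) : Int) < k)
              = false := by
            rw [decide_eq_false_iff_not]; push_cast; omega
          rw [h2, Bool.false_and]
        · rw [if_neg hk]
          have h2 : decide (((1 + (xs'.takeWhile (fun y => decide (y < n))).length : Nat) : Int) < k)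
              = true := by
            rw [decide_eq_true_eq]; push_cast at hk ⊢; omega
          rw [h2, Bool.true_and]
      · have hfe : (fun y => decide (y < n) == decide (x < n)) = (fun y => decide (y < n) == false) := by
          funext y
          simp only [hx, decide_false]
        rw [pvRuns, hfe]
        simp only [hx, decide_false, List.all_cons, Bool.not_false, Bool.true_or, Bool.true_and]
        have hpre : ∀ y ∈ xs'.takeWhile (fun y => decide (y < n) == false), ¬ y < n := by
          intro y hy
          have := List.mem_takeWhile_imp hy
          simpa using this
        have hA : canGoA (x :: xs') n k 0 = canGoA xs' n k 0 := by
          simp [canGoA, hx]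
        have h2 := goA_skip n k (xs'.takeWhile (fun y => decide (y < n) == false))
          (xs'.dropWhile (fun y => decide (y < n) == false)) hpre
        rw [List.takeWhile_append_dropWhile] at h2
        rw [hA, h2]
        exact ih _ (le_trans (List.length_dropWhile_le _ _) h)

-- ===== VERDICT (by name: the statement is the Claim_ definition above) =====
theorem can_cross_stones_spec : Claim_equal_can_cross_stones := by
  intro stones n k _
  unfold Spec_can_cross_stones can_cross_stones can_cross_stones_alt
  exact goA_eq_runs n k stones.length stones le_rfl
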